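-- pv_equiv track=rewrite | github.com/psemchyshyn/IMDB_research | literature_manag.py | books_of_author
-- ===== SOURCE A (Python) =====
-- from typing import List, Tuple, Union, Callable, Dict
--
-- def books_of_author(books_and_author: List[tuple]) -> Dict[str, str]:
--     """
--     A function which takes a list of tuples with the name
--     of the book and the author that wrote it. The
--     function returns a dictionary with the author as the key and books that he
--     wrote as a value(in form of set)
--     """
--     dict_of_books = {}
--     for element in books_and_author:
--         if element[1] not in dict_of_books:
--             dict_of_books[element[1]] = set()
--             dict_of_books[element[1]].add(element[0])
--         else:
--             dict_of_books[element[1]].add(element[0])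
--     return dict_of_books
-- ===== SOURCE B (Python) =====
-- def books_of_author(books_and_author):
--     """Group books by author: two-phase — collect the distinct authors, then
--     build each author's book-set by filtering the whole list."""
--     authors = {a for _, a in books_and_author}
--     return {a: {b for b, x in books_and_author if x == a} for a in authors}
-- ===== Notes on version B (the rewrite author's own statement) =====
-- stated objective: alternative
-- what changed: Replaces A's single-pass incremental dict-of-sets accumulation with a two-phase strategy: first collect the set of distinct authors, then build each author's book-set by filtering the whole list per author.
import Mathlib
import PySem

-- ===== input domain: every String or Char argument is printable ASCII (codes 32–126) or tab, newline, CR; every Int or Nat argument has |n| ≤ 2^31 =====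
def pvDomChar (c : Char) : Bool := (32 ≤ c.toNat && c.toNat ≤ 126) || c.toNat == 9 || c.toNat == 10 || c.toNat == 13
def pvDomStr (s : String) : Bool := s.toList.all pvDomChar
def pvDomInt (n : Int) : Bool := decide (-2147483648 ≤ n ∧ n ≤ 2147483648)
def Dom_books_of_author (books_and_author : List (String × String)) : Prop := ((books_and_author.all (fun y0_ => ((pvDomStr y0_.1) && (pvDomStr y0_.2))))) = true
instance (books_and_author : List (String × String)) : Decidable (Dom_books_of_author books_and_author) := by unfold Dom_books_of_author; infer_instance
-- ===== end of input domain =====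

-- B groups by author in two phases (collect the distinct authors, then filter the list per author)
-- instead of A's one-pass incremental dict of sets; same return value, objective: alternative.

-- ===== PORT A =====
-- A: one pass; for each (book, author), ensure a set exists under the author key, then add the book.
def books_of_author (books_and_author : List (String × String)) : List (String × List String) :=
  (books_and_author.foldl
    (fun dict_of_books element =>
      if dict_of_books.contains element.2 = false then
        let d := dict_of_books.insert element.2 PySem.Set.empty
        d.modify element.2 PySem.Set.empty (fun s => PySem.Set.add s element.1)
      else
        dict_of_books.modify element.2 PySem.Set.empty (fun s => PySem.Set.add s element.1))
    PySem.Dict.empty).items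

-- ===== PORT B =====
-- B: distinct authors first, then each author's set by filtering the whole list.
def books_of_author_alt (books_and_author : List (String × String)) : List (String × List String) :=
  (PySem.Set.ofList (books_and_author.map (·.2))).map
    (fun a => (a, PySem.Set.ofList
      ((books_and_author.filter (fun p => p.2 == a)).map (·.1))))

-- ===== PRECONDITION & SPEC =====
def Spec_books_of_author (books_and_author : List (String × String)) (out : List (String × List String)) : Prop := out = books_of_author_alt books_and_author
instance (books_and_author : List (String × String)) (out : List (String × List String)) : Decidable (Spec_books_of_author books_and_author out) := by unfold Spec_books_of_author; infer_instance

-- ===== CLAIM (what is proved, stated in full; the proofs are below) =====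
def Claim_equal_books_of_author : Prop := ∀ (books_and_author : List (String × String)), Dom_books_of_author books_and_author → Spec_books_of_author books_and_author (books_of_author books_and_author)

-- ===== LEMMAS AND PROOFS =====

-- A's two branches both amount to a single dict.modify that adds the book to the author's set.
theorem pv_step_eq (d : PySem.Dict String (List String)) (e : String × String) :
    (if d.contains e.2 = false then
      (d.insert e.2 PySem.Set.empty).modify e.2 PySem.Set.empty (fun s => PySem.Set.add s e.1)
    else
      d.modify e.2 PySem.Set.empty (fun s => PySem.Set.add s e.1))
    = d.modify e.2 PySem.Set.empty (fun s => PySem.Set.add s e.1) := by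
  by_cases h : d.contains e.2 = false
  · rw [if_pos h]
    simp [PySem.Dict.modify, PySem.Dict.getD_insert_self, PySem.Dict.insert_insert_self,
          PySem.Dict.getD_of_not_contains d ([] : List String) h, PySem.Set.add, PySem.Set.empty]
  · rw [if_neg h]

-- The value the modify-loop accumulates under key a: the books of author a, added left to right.
theorem pv_getD_fold (l : List (String × String)) (d : PySem.Dict String (List String)) (a : String) :
    (l.foldl (fun d p => d.modify p.2 PySem.Set.empty (fun s => PySem.Set.add s p.1)) d).getD a []
    = ((l.filter (fun p => p.2 == a)).map (·.1)).foldl PySem.Set.add (d.getD a []) := by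
  induction l generalizing d with
  | nil => simp
  | cons p l ih =>
    simp only [List.foldl_cons, ih, List.filter_cons]
    by_cases hpa : p.2 = a
    · subst hpa
      simp [PySem.Set.empty]
    · have hba : (p.2 == a) = false := by simp [hpa]
      simp [hba, PySem.Dict.getD_modify, PySem.Set.empty, Ne.symm hpa]

-- ===== VERDICT (by name: the statement is the Claim_ definition above) =====
theorem books_of_author_spec : Claim_equal_books_of_author := by
  intro xs _
  show books_of_author xs = books_of_author_alt xs
  unfold books_of_author books_of_author_alt
  have hstep :
      (fun (d : PySem.Dict String (List String)) (e : String × String) =>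
        if d.contains e.2 = false then
          let d' := d.insert e.2 PySem.Set.empty
          d'.modify e.2 PySem.Set.empty (fun s => PySem.Set.add s e.1)
        else
          d.modify e.2 PySem.Set.empty (fun s => PySem.Set.add s e.1))
      = (fun (d : PySem.Dict String (List String)) (e : String × String) =>
          d.modify e.2 PySem.Set.empty (fun s => PySem.Set.add s e.1)) := by
    funext d e
    exact pv_step_eq d e
  rw [hstep]
  have hnd : (xs.foldl (fun d (p : String × String) =>
      d.modify p.2 PySem.Set.empty (fun s => PySem.Set.add s p.1)) PySem.Dict.empty).keys.Nodup :=
    PySem.Dict.nodup_keys_foldl_modify_key xs (·.2) PySem.Set.empty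
      (fun _ p s => PySem.Set.add s p.1) PySem.Dict.empty PySem.Dict.nodup_keys_empty
  rw [PySem.Dict.items_eq_map_keys _ hnd ([] : List String)]
  have hkeys : (xs.foldl (fun d (p : String × String) =>
      d.modify p.2 PySem.Set.empty (fun s => PySem.Set.add s p.1)) PySem.Dict.empty).keys
      = PySem.Set.ofList (xs.map (·.2)) := by
    rw [PySem.Dict.keys_foldl_modify_key xs (·.2) PySem.Set.empty
        (fun _ p s => PySem.Set.add s p.1) PySem.Dict.empty]
    simp [PySem.Set.update, PySem.Set.ofList_eq_foldl, PySem.Dict.keys, PySem.Dict.empty]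
  rw [hkeys]
  apply List.map_congr_left
  intro a _
  rw [pv_getD_fold]
  simp [PySem.Set.ofList_eq_foldl, PySem.Dict.getD_empty]
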